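-- pv_equiv track=rewrite | github.com/mgaac/nar_index | utils/datasets/nega_custom/scripts/graph_generator.py | bfs_edge_list
-- ===== SOURCE A (Python) =====
-- def bfs_edge_list(edges, start):
--     nodes = set([node for edge in edges for node in edge[:2]])
--     state = {node: 1 if node == start else 0 for node in nodes}
--     state_history = [state.copy()]
--     for _ in range(len(nodes) - 1):
--         new_state = state.copy()
--         for u, v, _ in edges:
--             if state[u] == 1:
--                 new_state[v] = 1
--             if state[v] == 1:
--                 new_state[u] = 1
--         state = new_state
--         state_history.append(state.copy())
--     return state_history
-- ===== SOURCE B (Python) =====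
-- def bfs_edge_list(edges, start):
--     # Single BFS computes hop distances; snapshot k is then just the threshold dist[v] <= k.
--     nodes = set(n for e in edges for n in e[:2])
--     pairs = [p for u, v, _ in edges for p in ((u, v), (v, u))]
--     adj = {}
--     for u, w in pairs:
--         adj.setdefault(u, []).append(w)
--     dist = {start: 0} if start in nodes else {}
--     frontier = list(dist)
--     d = 0
--     while frontier:
--         d += 1
--         frontier = [w for u in frontier for w in adj.get(u, []) if w not in dist]
--         frontier = list(dict.fromkeys(frontier))
--         for w in frontier:
--             dist[w] = d
--     return [{n: 1 if n in dist and dist[n] <= k else 0 for n in nodes}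
--             for k in range(max(len(nodes), 1))]
-- ===== Notes on version B (the rewrite author's own statement) =====
-- stated objective: alternative
-- what changed: B runs a single adjacency-list BFS to compute each node's hop distance from start and then builds snapshot k by thresholding dist[v] <= k, instead of A's n-1 rounds that each copy the whole state dict and rescan every edge.
import Mathlib
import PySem

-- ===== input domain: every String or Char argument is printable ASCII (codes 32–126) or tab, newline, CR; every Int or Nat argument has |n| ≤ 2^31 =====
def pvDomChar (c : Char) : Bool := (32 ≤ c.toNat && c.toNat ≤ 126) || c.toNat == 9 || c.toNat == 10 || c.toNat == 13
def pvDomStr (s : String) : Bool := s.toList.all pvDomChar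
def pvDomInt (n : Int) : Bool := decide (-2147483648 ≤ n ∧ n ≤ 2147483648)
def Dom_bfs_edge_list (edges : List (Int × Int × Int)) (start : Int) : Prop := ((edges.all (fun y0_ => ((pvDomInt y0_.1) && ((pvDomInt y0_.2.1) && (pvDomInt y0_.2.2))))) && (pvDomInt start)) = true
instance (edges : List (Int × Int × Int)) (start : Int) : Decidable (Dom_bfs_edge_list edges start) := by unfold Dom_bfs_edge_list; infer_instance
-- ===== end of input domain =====

-- B replaces A's n-1 rounds (each copying the whole state dict and rescanning every edge) by a
-- single adjacency-list BFS computing hop distances, snapshot k then being dist[v] <= k;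
-- equal return value on all inputs (per-snapshot dicts are compared as dicts; in these ports
-- both sides build them in the same first-occurrence key order).

-- ===== PORT A =====
def bfs_edge_list (edges : List (Int × Int × Int)) (start : Int) : List (List (Int × Int)) :=
  let nodes : List Int := PySem.Set.ofList (edges.flatMap (fun e => [e.1, e.2.1]))
  let state : PySem.Dict Int Int :=
    nodes.foldl (fun d n => d.insert n (if n == start then 1 else 0)) PySem.Dict.empty
  let res := (List.range (nodes.length - 1)).foldl
    (fun (p : PySem.Dict Int Int × List (PySem.Dict Int Int)) _ =>
      let st := p.1
      -- state[u] / state[v]: KeyError impossible, every edge endpoint is in nodes, so getD is exact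
      let new_state := edges.foldl
        (fun ns e =>
          let ns := if st.getD e.1 0 == 1 then ns.insert e.2.1 1 else ns
          if st.getD e.2.1 0 == 1 then ns.insert e.1 1 else ns) st
      (new_state, p.2 ++ [new_state]))
    (state, [state])
  res.2.map (fun d => d.items)

-- ===== PORT B =====
-- pairs = [p for u, v, _ in edges for p in ((u, v), (v, u))]
def bPairs (edges : List (Int × Int × Int)) : List (Int × Int) :=
  edges.flatMap (fun e => [(e.1, e.2.1), (e.2.1, e.1)])

-- adj.setdefault(u, []).append(w) over the pairs
def bAdj (edges : List (Int × Int × Int)) : PySem.Dict Int (List Int) :=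
  (bPairs edges).foldl (fun d p => d.modify p.1 [] (· ++ [p.2])) PySem.Dict.empty

-- the while-frontier BFS loop; Python terminates because the nonempty frontiers are disjoint
-- subsets of the nodes, so a fuel of len(nodes)-1 iterations is an exact totality guard
def bLoop (adj : PySem.Dict Int (List Int)) :
    Nat → PySem.Dict Int Int → List Int → Int → PySem.Dict Int Int
  | 0, dist, _, _ => dist
  | fuel+1, dist, frontier, d =>
    if frontier.isEmpty then dist
    else
      let d' := d + 1
      let f1 := frontier.flatMap (fun u => (adj.getD u []).filter (fun w => !(dist.contains w)))
      let f2 := PySem.List.dedup f1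
      let dist' := f2.foldl (fun dd w => dd.insert w d') dist
      bLoop adj fuel dist' f2 d'

def bfs_edge_list_alt (edges : List (Int × Int × Int)) (start : Int) : List (List (Int × Int)) :=
  let nodes : List Int := PySem.Set.ofList (edges.flatMap (fun e => [e.1, e.2.1]))
  let adj := bAdj edges
  let dist0 : PySem.Dict Int Int :=
    if start ∈ nodes then PySem.Dict.empty.insert start 0 else PySem.Dict.empty
  let dist := bLoop adj (nodes.length - 1) dist0 dist0.keys 0
  (List.range (max nodes.length 1)).map (fun k =>
    (nodes.foldl (fun dc n =>
      dc.insert n (if dist.contains n && decide (dist.getD n 0 ≤ (k : Int)) then 1 else 0))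
      PySem.Dict.empty).items)

-- ===== PRECONDITION & SPEC =====
def Spec_bfs_edge_list (edges : List (Int × Int × Int)) (start : Int) (out : List (List (Int × Int))) : Prop := out = bfs_edge_list_alt edges start
instance (edges : List (Int × Int × Int)) (start : Int) (out : List (List (Int × Int))) : Decidable (Spec_bfs_edge_list edges start out) := by unfold Spec_bfs_edge_list; infer_instance

-- ===== CLAIM (what is proved, stated in full; the proofs are below) =====
def Claim_equal_bfs_edge_list : Prop := ∀ (edges : List (Int × Int × Int)) (start : Int), Dom_bfs_edge_list edges start → Spec_bfs_edge_list edges start (bfs_edge_list edges start)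

-- ===== LEMMAS AND PROOFS =====

-- a dict whose items are (n, f n) over a fixed key list
def mapDict (nodes : List Int) (f : Int → Int) : PySem.Dict Int Int :=
  PySem.Dict.mk (nodes.map (fun n => (n, f n)))

-- 0/1 membership indicator
def memInd (r : List Int) (n : Int) : Int := if n ∈ r then 1 else 0

-- one round of A's flood, as a pure function on the reached set
def floodStep (edges : List (Int × Int × Int)) (r : PySem.Set Int) : PySem.Set Int :=
  edges.foldl
    (fun nxt e =>
      let nxt := if PySem.Set.contains r e.1 then PySem.Set.add nxt e.2.1 else nxt
      if PySem.Set.contains r e.2.1 then PySem.Set.add nxt e.1 else nxt) r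

-- the reached set after k rounds
def iterS (edges : List (Int × Int × Int)) (r0 : PySem.Set Int) : Nat → PySem.Set Int
  | 0 => r0
  | k+1 => floodStep edges (iterS edges r0 k)

theorem mapDict_congr {nodes : List Int} {f g : Int → Int}
    (h : ∀ n ∈ nodes, f n = g n) : mapDict nodes f = mapDict nodes g := by
  unfold mapDict
  congr 1
  exact List.map_congr_left (fun n hn => by rw [h n hn])

theorem keys_mapDict (nodes : List Int) (f : Int → Int) :
    (mapDict nodes f).keys = nodes := by
  simp [mapDict, PySem.Dict.keys, Function.comp_def]

theorem comp_eq_mapDict (nodes : List Int) (f : Int → Int) (h : nodes.Nodup) :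
    nodes.foldl (fun d n => d.insert n (f n)) PySem.Dict.empty = mapDict nodes f := by
  apply PySem.Dict.ext
  have := PySem.Dict.items_foldl_insert_fresh (l := nodes) (k := fun n => n)
    (v := f) (d := PySem.Dict.empty) (by simp) (by simpa using h)
  simpa [mapDict] using this

theorem getD_mapDict {nodes : List Int} {n : Int} (f : Int → Int) (d0 : Int)
    (hnd : nodes.Nodup) (hn : n ∈ nodes) : (mapDict nodes f).getD n d0 = f n := by
  apply PySem.Dict.getD_of_mem_items
  · exact List.mem_map_of_mem hn
  · rw [keys_mapDict]; exact hnd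

theorem insert_mapDict {nodes : List Int} {x : Int} (f : Int → Int) (w : Int)
    (hx : x ∈ nodes) :
    (mapDict nodes f).insert x w = mapDict nodes (fun n => if n = x then w else f n) := by
  apply PySem.Dict.ext
  rw [PySem.Dict.items_insert_of_contains]
  · simp only [mapDict, List.map_map]
    apply List.map_congr_left
    intro n _
    by_cases h : n = x <;> simp [h]
  · rw [PySem.Dict.contains_iff_mem_keys, keys_mapDict]; exact hx

theorem insert1_mapDict {nodes : List Int} {x : Int} (acc : List Int)
    (hx : x ∈ nodes) :
    (mapDict nodes (memInd acc)).insert x 1 = mapDict nodes (memInd (PySem.Set.add acc x)) := by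
  rw [insert_mapDict _ _ hx]
  apply mapDict_congr
  intro n _
  simp only [memInd, PySem.Set.mem_add]
  by_cases h : n = x <;> simp [h]

-- one A-round on a mapDict simulates one floodStep on the reached set
theorem step_sim (nodes : List Int) (hnd : nodes.Nodup) (r : List Int) :
    ∀ (es : List (Int × Int × Int)) (acc : List Int),
    (∀ e ∈ es, e.1 ∈ nodes ∧ e.2.1 ∈ nodes) →
    es.foldl
      (fun ns e =>
        let ns := if (mapDict nodes (memInd r)).getD e.1 0 == 1 then ns.insert e.2.1 1 else ns
        if (mapDict nodes (memInd r)).getD e.2.1 0 == 1 then ns.insert e.1 1 else ns)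
      (mapDict nodes (memInd acc))
    = mapDict nodes (memInd (es.foldl
        (fun nxt e =>
          let nxt := if PySem.Set.contains r e.1 then PySem.Set.add nxt e.2.1 else nxt
          if PySem.Set.contains r e.2.1 then PySem.Set.add nxt e.1 else nxt) acc)) := by
  intro es
  induction es with
  | nil => intro acc _; simp
  | cons e es ih =>
    intro acc he
    have h1 : e.1 ∈ nodes := (he e (by simp)).1
    have h2 : e.2.1 ∈ nodes := (he e (by simp)).2
    have hg1 : (mapDict nodes (memInd r)).getD e.1 0 = memInd r e.1 := getD_mapDict _ _ hnd h1
    have hg2 : (mapDict nodes (memInd r)).getD e.2.1 0 = memInd r e.2.1 := getD_mapDict _ _ hnd h2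
    have hc1 : PySem.Set.contains r e.1 = decide (e.1 ∈ r) := by
      by_cases h : e.1 ∈ r <;> simp [h]
    have hc2 : PySem.Set.contains r e.2.1 = decide (e.2.1 ∈ r) := by
      by_cases h : e.2.1 ∈ r <;> simp [h]
    simp only [List.foldl_cons]
    have hih := fun acc => ih acc (fun e' h' => he e' (by simp [h']))
    have e1 : ((mapDict nodes (memInd r)).getD e.1 0 == 1) = decide (e.1 ∈ r) := by
      rw [hg1]; by_cases m : e.1 ∈ r <;> simp [memInd, m]
    have e2 : ((mapDict nodes (memInd r)).getD e.2.1 0 == 1) = decide (e.2.1 ∈ r) := by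
      rw [hg2]; by_cases m : e.2.1 ∈ r <;> simp [memInd, m]
    by_cases m1 : e.1 ∈ r <;> by_cases m2 : e.2.1 ∈ r <;>
      simp only [e1, e2, hc1, hc2, m1, m2, decide_true, decide_false, Bool.false_eq_true,
        if_true, if_false]
    · rw [insert1_mapDict acc h2, insert1_mapDict _ h1]; exact hih _
    · rw [insert1_mapDict acc h2]; exact hih _
    · rw [insert1_mapDict acc h1]; exact hih _
    · exact hih _

theorem mem_floodStep (r : List Int) (x : Int) :
    ∀ (es : List (Int × Int × Int)) (acc : List Int),
    (x ∈ es.foldl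
        (fun nxt e =>
          let nxt := if PySem.Set.contains r e.1 then PySem.Set.add nxt e.2.1 else nxt
          if PySem.Set.contains r e.2.1 then PySem.Set.add nxt e.1 else nxt) acc
      ↔ x ∈ acc ∨ ∃ e ∈ es, (e.1 ∈ r ∧ x = e.2.1) ∨ (e.2.1 ∈ r ∧ x = e.1)) := by
  intro es
  induction es with
  | nil => simp
  | cons e es ih =>
    intro acc
    simp only [List.foldl_cons]
    rw [ih]
    have hc1 : PySem.Set.contains r e.1 = decide (e.1 ∈ r) := by
      by_cases h : e.1 ∈ r <;> simp [h]
    have hc2 : PySem.Set.contains r e.2.1 = decide (e.2.1 ∈ r) := by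
      by_cases h : e.2.1 ∈ r <;> simp [h]
    rw [hc1, hc2]
    by_cases m1 : e.1 ∈ r <;> by_cases m2 : e.2.1 ∈ r <;>
      simp [m1, m2, PySem.Set.mem_add, or_assoc]

theorem mem_floodStep_iff (edges : List (Int × Int × Int)) (r : List Int) (x : Int) :
    x ∈ floodStep edges r ↔ x ∈ r ∨ ∃ e ∈ edges, (e.1 ∈ r ∧ x = e.2.1) ∨ (e.2.1 ∈ r ∧ x = e.1) := by
  exact mem_floodStep r x edges r

-- once a round adds nothing, membership never changes again
theorem iterS_fix (edges : List (Int × Int × Int)) (r : PySem.Set Int)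
    (hfix : ∀ x, x ∈ floodStep edges r ↔ x ∈ r) :
    ∀ j x, x ∈ iterS edges r j ↔ x ∈ r := by
  intro j
  induction j with
  | zero => intro x; rfl
  | succ j ih =>
    intro x
    rw [show iterS edges r (j+1) = floodStep edges (iterS edges r j) from rfl,
      mem_floodStep_iff, ← hfix x, mem_floodStep_iff]
    constructor
    · rintro (h | ⟨e, he, h⟩)
      · exact Or.inl ((ih x).1 h)
      · exact Or.inr ⟨e, he, by rcases h with ⟨h1, h2⟩ | ⟨h1, h2⟩
                                exacts [Or.inl ⟨(ih _).1 h1, h2⟩, Or.inr ⟨(ih _).1 h1, h2⟩]⟩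
    · rintro (h | ⟨e, he, h⟩)
      · exact Or.inl ((ih x).2 h)
      · exact Or.inr ⟨e, he, by rcases h with ⟨h1, h2⟩ | ⟨h1, h2⟩
                                exacts [Or.inl ⟨(ih _).2 h1, h2⟩, Or.inr ⟨(ih _).2 h1, h2⟩]⟩

-- A's main loop unrolled against iterS
theorem aLoop_spec (edges : List (Int × Int × Int)) (nodes : List Int) (hnd : nodes.Nodup)
    (he : ∀ e ∈ edges, e.1 ∈ nodes ∧ e.2.1 ∈ nodes) (r0 : PySem.Set Int) :
    ∀ (m j : Nat) (H : List (PySem.Dict Int Int)),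
    (List.range m).foldl
      (fun (p : PySem.Dict Int Int × List (PySem.Dict Int Int)) _ =>
        let st := p.1
        let new_state := edges.foldl
          (fun ns e =>
            let ns := if st.getD e.1 0 == 1 then ns.insert e.2.1 1 else ns
            if st.getD e.2.1 0 == 1 then ns.insert e.1 1 else ns) st
        (new_state, p.2 ++ [new_state]))
      (mapDict nodes (memInd (iterS edges r0 j)), H)
    = (mapDict nodes (memInd (iterS edges r0 (j + m))),
       H ++ (List.range m).map (fun i => mapDict nodes (memInd (iterS edges r0 (j + 1 + i))))) := by
  intro m
  induction m with
  | zero => intro j H; simp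
  | succ m ih =>
    intro j H
    rw [List.range_succ, List.foldl_append, ih]
    simp only [List.foldl_cons, List.foldl_nil, List.map_append, Prod.mk.injEq]
    have hL : List.foldl
        (fun ns e =>
          let ns := if ((mapDict nodes (memInd (iterS edges r0 (j + m)))).getD e.1 0 == 1) = true then ns.insert e.2.1 1 else ns
          if ((mapDict nodes (memInd (iterS edges r0 (j + m)))).getD e.2.1 0 == 1) = true then ns.insert e.1 1 else ns)
        (mapDict nodes (memInd (iterS edges r0 (j + m)))) edges
        = mapDict nodes (memInd (iterS edges r0 (j + m + 1))) := by
      exact step_sim nodes hnd (iterS edges r0 (j + m)) edges (iterS edges r0 (j + m)) he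
    refine ⟨by rw [show j + (m + 1) = j + m + 1 by omega]; exact hL, ?_⟩
    rw [List.append_assoc]
    congr 1
    simp only [List.map_cons, List.map_nil]
    rw [hL, show j + 1 + m = j + m + 1 by omega]

theorem iterS_add (edges : List (Int × Int × Int)) (r0 : PySem.Set Int) (j : Nat) :
    ∀ k, iterS edges (iterS edges r0 j) k = iterS edges r0 (j + k)
  | 0 => rfl
  | k+1 => by
    show floodStep edges (iterS edges (iterS edges r0 j) k) = floodStep edges (iterS edges r0 (j + k))
    rw [iterS_add edges r0 j k]

-- iterS is monotone
theorem iterS_succ_sup (edges : List (Int × Int × Int)) (r0 : PySem.Set Int) (j : Nat) {x : Int}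
    (h : x ∈ iterS edges r0 j) : x ∈ iterS edges r0 (j + 1) := by
  rw [show iterS edges r0 (j+1) = floodStep edges (iterS edges r0 j) from rfl,
    mem_floodStep_iff]
  exact Or.inl h

theorem iterS_mono_add (edges : List (Int × Int × Int)) (r0 : PySem.Set Int) (i : Nat) :
    ∀ (d : Nat) {x : Int}, x ∈ iterS edges r0 i → x ∈ iterS edges r0 (i + d)
  | 0, _, h => h
  | d+1, _, h => iterS_succ_sup edges r0 (i+d) (iterS_mono_add edges r0 i d h)

theorem iterS_mono (edges : List (Int × Int × Int)) (r0 : PySem.Set Int) :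
    ∀ {i j : Nat}, i ≤ j → ∀ {x}, x ∈ iterS edges r0 i → x ∈ iterS edges r0 j := by
  intro i j hij x h
  obtain ⟨d, rfl⟩ := Nat.exists_eq_add_of_le hij
  exact iterS_mono_add edges r0 i d h

-- a first round at which a reached node appears
theorem least_mem (edges : List (Int × Int × Int)) (r0 : PySem.Set Int) (u : Int) (j : Nat)
    (h : u ∈ iterS edges r0 j) :
    ∃ i, i ≤ j ∧ u ∈ iterS edges r0 i ∧ ∀ i' < i, u ∉ iterS edges r0 i' := by
  have hP : ∃ i, u ∈ iterS edges r0 i := ⟨j, h⟩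
  exact ⟨Nat.find hP, Nat.find_min' hP h, Nat.find_spec hP, fun i' hi' => Nat.find_min hP hi'⟩

-- membership in an adjacency list of B
theorem mem_bAdj (edges : List (Int × Int × Int)) (u x : Int) :
    x ∈ (bAdj edges).getD u [] ↔
      ∃ e ∈ edges, (e.1 = u ∧ e.2.1 = x) ∨ (e.2.1 = u ∧ e.1 = x) := by
  unfold bAdj
  rw [PySem.Dict.getD_foldl_modify_append]
  simp only [PySem.Dict.getD_empty, List.nil_append, List.mem_map, List.mem_filter, bPairs,
    List.mem_flatMap, List.mem_cons, beq_iff_eq]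
  constructor
  · rintro ⟨p, ⟨⟨e, he, hp | hp | hp⟩, hpu⟩, hpx⟩
    · exact ⟨e, he, Or.inl ⟨by rw [hp] at hpu; exact hpu, by rw [hp] at hpx; exact hpx⟩⟩
    · exact ⟨e, he, Or.inr ⟨by rw [hp] at hpu; exact hpu, by rw [hp] at hpx; exact hpx⟩⟩
    · cases hp
  · rintro ⟨e, he, ⟨h1, h2⟩ | ⟨h1, h2⟩⟩
    · exact ⟨(e.1, e.2.1), ⟨⟨e, he, Or.inl rfl⟩, h1⟩, h2⟩
    · exact ⟨(e.2.1, e.1), ⟨⟨e, he, Or.inr (Or.inl rfl)⟩, h1⟩, h2⟩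

-- lookups after inserting a constant value over a list of keys
theorem get?_foldl_insert_const (v : Int) (x : Int) :
    ∀ (l : List Int) (dist : PySem.Dict Int Int),
    (l.foldl (fun dd w => dd.insert w v) dist).get? x
      = if x ∈ l then some v else dist.get? x := by
  intro l
  induction l with
  | nil => intro dist; simp
  | cons w l ih =>
    intro dist
    simp only [List.foldl_cons, ih, List.mem_cons]
    by_cases hxl : x ∈ l
    · simp [hxl]
    · by_cases hxw : x = w <;> simp [hxl, hxw, PySem.Dict.get?_insert]

-- the BFS loop invariant
def INV (edges : List (Int × Int × Int)) (r0 : PySem.Set Int)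
    (dist : PySem.Dict Int Int) (frontier : List Int) (j : Nat) : Prop :=
  (∀ k ≤ j, ∀ x, (dist.contains x = true ∧ dist.getD x 0 ≤ (k : Int)) ↔ x ∈ iterS edges r0 k) ∧
  (∀ x, dist.contains x = true → dist.getD x 0 ≤ (j : Int)) ∧
  (∀ x, x ∈ frontier ↔ (x ∈ iterS edges r0 j ∧ ∀ i < j, x ∉ iterS edges r0 i))

theorem bLoop_spec (edges : List (Int × Int × Int)) (r0 : PySem.Set Int) :
    ∀ (fuel : Nat) (dist : PySem.Dict Int Int) (frontier : List Int) (j : Nat),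
    INV edges r0 dist frontier j →
    ∀ k ≤ j + fuel, ∀ x,
      ((bLoop (bAdj edges) fuel dist frontier (j : Int)).contains x = true ∧
       (bLoop (bAdj edges) fuel dist frontier (j : Int)).getD x 0 ≤ (k : Int))
      ↔ x ∈ iterS edges r0 k := by
  intro fuel
  induction fuel with
  | zero =>
    intro dist frontier j inv k hk x
    exact inv.1 k (by omega) x
  | succ fuel ih =>
    intro dist frontier j inv k hk x
    obtain ⟨hb, hc, hd⟩ := inv
    by_cases hfe : frontier.isEmpty
    · -- frontier empty: the flood has stabilised
      have hunf : bLoop (bAdj edges) (fuel+1) dist frontier (j:Int) = dist := by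
        simp [bLoop, hfe]
      rw [hunf]
      have hnil : frontier = [] := List.isEmpty_iff.mp hfe
      have hstep : ∀ y, y ∈ floodStep edges (iterS edges r0 j) ↔ y ∈ iterS edges r0 j := by
        intro y
        constructor
        · intro hy
          rcases (mem_floodStep_iff edges _ y).mp hy with h | ⟨e, he, hcase⟩
          · exact h
          · have key : ∀ u : Int, u ∈ iterS edges r0 j →
                ((e.1 = u ∧ y = e.2.1) ∨ (e.2.1 = u ∧ y = e.1)) →
                y ∈ iterS edges r0 j := by
              intro u hu hor
              obtain ⟨i0, hi0j, hi0, hi0min⟩ := least_mem edges r0 u j hu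
              rcases Nat.lt_or_ge i0 j with hlt | hge
              · have hy' : y ∈ iterS edges r0 (i0 + 1) := by
                  rw [show iterS edges r0 (i0+1) = floodStep edges (iterS edges r0 i0) from rfl,
                    mem_floodStep_iff]
                  rcases hor with ⟨h1, h2⟩ | ⟨h1, h2⟩
                  · exact Or.inr ⟨e, he, Or.inl ⟨by rw [h1]; exact hi0, h2⟩⟩
                  · exact Or.inr ⟨e, he, Or.inr ⟨by rw [h1]; exact hi0, h2⟩⟩
                exact iterS_mono edges r0 (by omega) hy'
              · have : u ∈ frontier := (hd u).mpr ⟨by rwa [Nat.le_antisymm hi0j hge] at hi0,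
                  fun i' hi' => hi0min i' (by omega)⟩
                rw [hnil] at this; cases this
            rcases hcase with ⟨h1, h2⟩ | ⟨h1, h2⟩
            · exact key e.1 h1 (Or.inl ⟨rfl, h2⟩)
            · exact key e.2.1 h1 (Or.inr ⟨rfl, h2⟩)
        · intro hy
          rw [mem_floodStep_iff]; exact Or.inl hy
      by_cases hkj : k ≤ j
      · exact hb k hkj x
      · have hjk : j < k := by omega
        have hSk : (x ∈ iterS edges r0 k) ↔ x ∈ iterS edges r0 j := by
          have h1 := iterS_fix edges (iterS edges r0 j) hstep (k - j) x
          rwa [iterS_add edges r0 j (k - j), Nat.add_sub_cancel' (by omega)] at h1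
        rw [hSk]
        constructor
        · rintro ⟨hcx, -⟩
          exact (hb j le_rfl x).mp ⟨hcx, hc x hcx⟩
        · intro hx
          obtain ⟨hcx, hgx⟩ := (hb j le_rfl x).mpr hx
          exact ⟨hcx, le_trans hgx (by exact_mod_cast Nat.le_of_lt hjk)⟩
    · -- frontier nonempty: one more BFS level
      have hcast : (j : Int) + 1 = ((j + 1 : Nat) : Int) := by push_cast; ring
      have hunf : bLoop (bAdj edges) (fuel+1) dist frontier (j:Int)
          = bLoop (bAdj edges) fuel
              ((PySem.List.dedup (frontier.flatMap
                  (fun u => ((bAdj edges).getD u []).filter (fun w => !(dist.contains w))))).foldl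
                (fun dd w => dd.insert w (((j + 1 : Nat)) : Int)) dist)
              (PySem.List.dedup (frontier.flatMap
                  (fun u => ((bAdj edges).getD u []).filter (fun w => !(dist.contains w)))))
              (((j + 1 : Nat)) : Int) := by
        simp [bLoop, hfe, ← hcast]
      rw [hunf]
      set f2 := PySem.List.dedup (frontier.flatMap
        (fun u => ((bAdj edges).getD u []).filter (fun w => !(dist.contains w)))) with hf2
      have hnotSj : ∀ y, dist.contains y = false → y ∉ iterS edges r0 j := by
        intro y hy hmem
        have := ((hb j le_rfl y).mpr hmem).1
        rw [hy] at this; cases this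
      have f2mem : ∀ y, y ∈ f2 ↔ (y ∈ iterS edges r0 (j+1) ∧ ∀ i < j+1, y ∉ iterS edges r0 i) := by
        intro y
        rw [hf2, PySem.List.mem_dedup]
        simp only [List.mem_flatMap, List.mem_filter, Bool.not_eq_eq_eq_not, Bool.not_true]
        constructor
        · rintro ⟨u, hu, hyadj, hync⟩
          obtain ⟨huSj, -⟩ := (hd u).mp hu
          obtain ⟨e, he, hor⟩ := (mem_bAdj edges u y).mp hyadj
          refine ⟨?_, ?_⟩
          · rw [show iterS edges r0 (j+1) = floodStep edges (iterS edges r0 j) from rfl,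
              mem_floodStep_iff]
            rcases hor with ⟨h1, h2⟩ | ⟨h1, h2⟩
            · exact Or.inr ⟨e, he, Or.inl ⟨by rw [h1]; exact huSj, h2.symm⟩⟩
            · exact Or.inr ⟨e, he, Or.inr ⟨by rw [h1]; exact huSj, h2.symm⟩⟩
          · intro i hi hyi
            exact hnotSj y hync (iterS_mono edges r0 (by omega) hyi)
        · rintro ⟨hy1, hyn⟩
          have hynotj : y ∉ iterS edges r0 j := hyn j (by omega)
          rcases (mem_floodStep_iff edges _ y).mp hy1 with h | ⟨e, he, hcase⟩
          · exact absurd h hynotj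
          · have hync : dist.contains y = false := by
              cases hyc : dist.contains y
              · rfl
              · exact absurd ((hb j le_rfl y).mp ⟨hyc, hc y hyc⟩) hynotj
            have key : ∀ u : Int, u ∈ iterS edges r0 j →
                (∃ e ∈ edges, (e.1 = u ∧ e.2.1 = y) ∨ (e.2.1 = u ∧ e.1 = y)) →
                ∃ u', u' ∈ frontier ∧ y ∈ ((bAdj edges).getD u' []) := by
              intro u hu hadj
              obtain ⟨i0, hi0j, hi0, hi0min⟩ := least_mem edges r0 u j hu
              rcases Nat.lt_or_ge i0 j with hlt | hge
              · exfalso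
                obtain ⟨e', he', hor'⟩ := hadj
                have hy' : y ∈ iterS edges r0 (i0 + 1) := by
                  rw [show iterS edges r0 (i0+1) = floodStep edges (iterS edges r0 i0) from rfl,
                    mem_floodStep_iff]
                  rcases hor' with ⟨h1, h2⟩ | ⟨h1, h2⟩
                  · exact Or.inr ⟨e', he', Or.inl ⟨by rw [h1]; exact hi0, h2.symm⟩⟩
                  · exact Or.inr ⟨e', he', Or.inr ⟨by rw [h1]; exact hi0, h2.symm⟩⟩
                exact hyn (i0 + 1) (by omega) hy'
              · have hufr : u ∈ frontier := (hd u).mpr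
                  ⟨by rwa [Nat.le_antisymm hi0j hge] at hi0, fun i' hi' => hi0min i' (by omega)⟩
                exact ⟨u, hufr, (mem_bAdj edges u y).mpr hadj⟩
            rcases hcase with ⟨h1, h2⟩ | ⟨h1, h2⟩
            · obtain ⟨u', hu', hy'⟩ := key e.1 h1 ⟨e, he, Or.inl ⟨rfl, h2.symm⟩⟩
              exact ⟨u', hu', hy', hync⟩
            · obtain ⟨u', hu', hy'⟩ := key e.2.1 h1 ⟨e, he, Or.inr ⟨rfl, h2.symm⟩⟩
              exact ⟨u', hu', hy', hync⟩
      -- lookups in the updated dist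
      have hget : ∀ y, (f2.foldl (fun dd w => dd.insert w ((j+1:Nat):Int)) dist).get? y
          = if y ∈ f2 then some ((j+1:Nat):Int) else dist.get? y :=
        fun y => get?_foldl_insert_const ((j+1:Nat):Int) y f2 dist
      have hcont : ∀ y, (f2.foldl (fun dd w => dd.insert w ((j+1:Nat):Int)) dist).contains y
          = (decide (y ∈ f2) || dist.contains y) := by
        intro y
        rw [PySem.Dict.contains_eq_isSome_get?, hget y, PySem.Dict.contains_eq_isSome_get?]
        by_cases hy : y ∈ f2 <;> simp [hy]
      have hgetD : ∀ y, (f2.foldl (fun dd w => dd.insert w ((j+1:Nat):Int)) dist).getD y 0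
          = if y ∈ f2 then ((j+1:Nat):Int) else dist.getD y 0 := by
        intro y
        rw [PySem.Dict.getD_eq_get?_getD, hget y]
        by_cases hy : y ∈ f2 <;> simp [hy, PySem.Dict.getD_eq_get?_getD]
      -- the invariant at level j+1
      have inv' : INV edges r0 (f2.foldl (fun dd w => dd.insert w ((j+1:Nat):Int)) dist) f2 (j+1) := by
        refine ⟨?_, ?_, f2mem⟩
        · intro k' hk' y
          rw [hcont y, hgetD y]
          by_cases hy : y ∈ f2
          · obtain ⟨hyS, hyn⟩ := (f2mem y).mp hy
            rcases Nat.lt_or_ge k' (j+1) with hlt | hge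
            · simp only [hy, if_pos, decide_true, Bool.true_or]
              constructor
              · rintro ⟨-, hle⟩
                exact absurd hle (by push_cast; omega)
              · intro hyk; exact absurd hyk (hyn k' hlt)
            · have hk'eq : k' = j + 1 := by omega
              subst hk'eq
              simp only [hy, if_pos, decide_true, Bool.true_or]
              exact ⟨fun _ => hyS, fun _ => ⟨trivial, le_rfl⟩⟩
          · simp only [hy, if_neg, decide_false, Bool.false_or, not_false_iff]
            rcases Nat.lt_or_ge k' (j+1) with hlt | hge
            · exact hb k' (by omega) y
            · have hk'eq : k' = j + 1 := by omega
              subst hk'eq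
              constructor
              · rintro ⟨hyc, -⟩
                exact iterS_mono edges r0 (Nat.le_succ j)
                  ((hb j le_rfl y).mp ⟨hyc, hc y hyc⟩)
              · intro hyS
                have hyj : y ∈ iterS edges r0 j := by
                  by_contra hne
                  exact hy ((f2mem y).mpr ⟨hyS, fun i hi hyi =>
                    hne (iterS_mono edges r0 (by omega) hyi)⟩)
                obtain ⟨hyc, hyg⟩ := (hb j le_rfl y).mpr hyj
                exact ⟨hyc, le_trans hyg (by push_cast; omega)⟩
        · intro y hy
          rw [hcont y] at hy
          rw [hgetD y]
          by_cases hyf : y ∈ f2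
          · simp [hyf]
          · simp only [hyf, if_neg, decide_false, Bool.false_or, not_false_iff] at hy ⊢
            exact le_trans (hc y hy) (by push_cast; omega)
      exact ih _ f2 (j+1) inv' k (by omega) x

-- ===== VERDICT (by name: the statement is the Claim_ definition above) =====
theorem bfs_edge_list_spec : Claim_equal_bfs_edge_list := by
  intro edges start _
  show bfs_edge_list edges start = bfs_edge_list_alt edges start
  set nodes := PySem.Set.ofList (edges.flatMap (fun e => [e.1, e.2.1])) with hnodes
  have hnd : nodes.Nodup := PySem.Set.nodup_ofList _
  have he : ∀ e ∈ edges, e.1 ∈ nodes ∧ e.2.1 ∈ nodes := by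
    intro e heM
    constructor <;>
      · rw [hnodes, PySem.Set.mem_ofList]
        exact List.mem_flatMap.2 ⟨e, heM, by simp⟩
  set r0 := if start ∈ nodes then [start] else ([] : List Int) with hr0
  set dist0 := (if start ∈ nodes then PySem.Dict.empty.insert start 0
    else (PySem.Dict.empty : PySem.Dict Int Int)) with hdist0
  have hmr0 : ∀ x, x ∈ r0 ↔ (x = start ∧ start ∈ nodes) := by
    intro x
    rw [hr0]
    by_cases hs : start ∈ nodes <;> simp [hs]
  have hkeys : dist0.keys = r0 := by
    rw [hdist0, hr0]
    by_cases hs : start ∈ nodes <;>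
      simp [hs, PySem.Dict.keys, PySem.Dict.items_insert_of_not_contains, PySem.Dict.empty]
  have hval0 : ∀ x, dist0.getD x 0 = 0 := by
    intro x
    rw [hdist0]
    by_cases hs : start ∈ nodes
    · by_cases hx : x = start
      · subst hx; simp [hs, PySem.Dict.getD_insert_self]
      · simp [hs, PySem.Dict.getD_insert, hx, PySem.Dict.getD_empty]
    · simp [hs, PySem.Dict.getD_empty]
  have hcont0 : ∀ x, dist0.contains x = true ↔ x ∈ r0 := by
    intro x
    rw [hdist0]
    by_cases hs : start ∈ nodes
    · simp [hs, PySem.Dict.contains_insert, hr0]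
    · simp [hs, PySem.Dict.contains_empty, hr0]
  have inv0 : INV edges r0 dist0 dist0.keys 0 := by
    refine ⟨?_, ?_, ?_⟩
    · intro k hk x
      have hk0 : k = 0 := Nat.le_zero.mp hk
      subst hk0
      rw [hval0 x]
      constructor
      · rintro ⟨h, -⟩
        exact (hcont0 x).mp h
      · intro h
        exact ⟨(hcont0 x).mpr h, by norm_num⟩
    · intro x hx
      rw [hval0 x]
      norm_num
    · intro x
      rw [hkeys]
      simp [show iterS edges r0 0 = r0 from rfl]
  have Hdist := bLoop_spec edges r0 (nodes.length - 1) dist0 dist0.keys 0 inv0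
  simp only [Nat.cast_zero, Nat.zero_add] at Hdist
  set dist := bLoop (bAdj edges) (nodes.length - 1) dist0 dist0.keys 0 with hdistdef
  -- A's initial state is the indicator dict of r0
  have hstate : nodes.foldl (fun d n => d.insert n (if n == start then 1 else 0)) PySem.Dict.empty
      = mapDict nodes (memInd r0) := by
    rw [comp_eq_mapDict _ _ hnd]
    apply mapDict_congr
    intro n hn
    by_cases h : n = start
    · subst h
      simp [memInd, (hmr0 n).mpr ⟨rfl, hn⟩]
    · have hnr : n ∉ r0 := fun hx => h ((hmr0 n).mp hx).1
      simp [memInd, h, hnr]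
  have ha := aLoop_spec edges nodes hnd he r0 (nodes.length - 1) 0
    [mapDict nodes (memInd (iterS edges r0 0))]
  have hA : bfs_edge_list edges start
      = ((mapDict nodes (memInd (iterS edges r0 0))) ::
          (List.range (nodes.length - 1)).map
            (fun i => mapDict nodes (memInd (iterS edges r0 (0 + 1 + i))))).map
        (fun d => d.items) := by
    unfold bfs_edge_list
    simp only [← hnodes, hstate]
    have hinit : mapDict nodes (memInd r0) = mapDict nodes (memInd (iterS edges r0 0)) := rfl
    rw [hinit, ha]
    simp
  -- B's snapshots are the indicator dicts of the reachable sets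
  have hsnap : ∀ k : Nat, k ≤ nodes.length - 1 →
      nodes.foldl (fun dc n =>
        dc.insert n (if dist.contains n && decide (dist.getD n 0 ≤ (k : Int)) then 1 else 0))
        PySem.Dict.empty
      = mapDict nodes (memInd (iterS edges r0 k)) := by
    intro k hk
    rw [comp_eq_mapDict _ _ hnd]
    apply mapDict_congr
    intro n hn
    by_cases hn' : n ∈ iterS edges r0 k
    · obtain ⟨h1, h2⟩ := (Hdist k hk n).mpr hn'
      simp [memInd, h1, h2, hn']
    · have hnc : ¬(dist.contains n = true ∧ dist.getD n 0 ≤ (k : Int)) :=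
        fun hcc => hn' ((Hdist k hk n).mp hcc)
      cases hc1 : dist.contains n
      · simp [memInd, hn']
      · have h2 : ¬ (dist.getD n 0 ≤ (k : Int)) := fun hle => hnc ⟨hc1, hle⟩
        simp [memInd, hn', h2]
  have hB : bfs_edge_list_alt edges start
      = (List.range (max nodes.length 1)).map
          (fun k => (mapDict nodes (memInd (iterS edges r0 k))).items) := by
    unfold bfs_edge_list_alt
    simp only [← hnodes, ← hdist0, ← hdistdef]
    apply List.map_congr_left
    intro k hkm
    have hk : k ≤ nodes.length - 1 := by
      have := List.mem_range.mp hkm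
      omega
    rw [hsnap k hk]
  rw [hA, hB]
  rw [show max nodes.length 1 = (nodes.length - 1) + 1 from by omega, List.range_succ_eq_map]
  simp only [List.map_cons, List.map_map, Function.comp_def]
  refine List.cons_eq_cons.mpr ⟨rfl, ?_⟩
  apply List.map_congr_left
  intro i hi
  rw [show 0 + 1 + i = i + 1 from by omega]
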